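-- pv_equiv track=rewrite | github.com/bharaddur/OpinionMiner | ominer/views.py | hashtag_list
-- ===== SOURCE A (Python) =====
-- def hashtag_list(list):
--     frequency = {}
--
--     # Iterate over the list and update the frequency dictionary
--     for item in list:
--         if item in frequency:
--             frequency[item] += 1
--         else:
--             frequency[item] = 1
--
--     # Create an empty set to keep track of added items
--     added_items = set()
--
--     # Create an empty list to store the weighted items
--     weighted_items = []
--
--     # Add items to the list with weights based on their frequency
--     for item in list:
--         if item not in added_items:
--             weight = frequency[item]
--             weighted_items.append((item, weight))
--             added_items.add(item)
--
--     return weighted_items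
-- ===== SOURCE B (Python) =====
-- def hashtag_list(list):
--     result = []
--     remaining = list
--     while remaining:
--         head = remaining[0]
--         rest = [item for item in remaining if item != head]
--         result.append((head, len(remaining) - len(rest)))
--         remaining = rest
--     return result
-- ===== Notes on version B (the rewrite author's own statement) =====
-- stated objective: alternative
-- what changed: Replaces A's dict-counting pass plus set-guarded second scan with an iterative partition: repeatedly take the head of the remaining list, filter out all its occurrences, record the count as the length difference, and continue on the remainder; no dict and no set.
import Mathlib
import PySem

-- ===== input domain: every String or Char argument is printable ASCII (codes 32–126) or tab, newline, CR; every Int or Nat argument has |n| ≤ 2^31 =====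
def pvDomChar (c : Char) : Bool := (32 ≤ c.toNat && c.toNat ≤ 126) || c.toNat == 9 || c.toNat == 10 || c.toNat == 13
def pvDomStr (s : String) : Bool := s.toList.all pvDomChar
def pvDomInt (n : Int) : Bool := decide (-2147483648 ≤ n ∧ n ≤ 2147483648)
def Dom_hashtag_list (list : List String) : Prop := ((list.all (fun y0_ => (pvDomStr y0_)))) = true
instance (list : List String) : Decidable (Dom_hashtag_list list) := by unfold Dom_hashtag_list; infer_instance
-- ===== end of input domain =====

-- B replaces A's dict-counting pass plus set-guarded second scan by an iterative
-- partition loop: take the head of the remaining list, filter out its occurrences,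
-- count them by length difference, continue on the remainder (no dict, no set).


-- ===== PORT A =====
def hashtag_list (list : List String) : List (String × Int) :=
  let frequency := list.foldl (fun d item =>
      if d.contains item then d.insert item (d.getD item 0 + 1)
      else d.insert item 1) PySem.Dict.empty
  -- second pass: added_items set + weighted_items list
  let st := list.foldl (fun (st : PySem.Set String × List (String × Int)) item =>
      if PySem.Set.contains st.1 item then st
      else (PySem.Set.add st.1 item, st.2 ++ [(item, frequency.getD item 0)]))
    (PySem.Set.empty, [])
  st.2

-- ===== PORT B =====
-- B's while loop: state = (remaining, result); one round peels off the head's occurrences.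
def hashtagAltGo : List String → List (String × Int) → List (String × Int)
  | [], result => result
  | head :: tl, result =>
    let rest := (head :: tl).filter (fun item => item != head)
    hashtagAltGo rest (result ++ [(head, ((head :: tl).length : Int) - (rest.length : Int))])
termination_by remaining _ => remaining.length
decreasing_by
  simp only [List.filter_cons, bne_self_eq_false, List.length_cons]
  exact Nat.lt_succ_of_le (List.length_filter_le _ _)

def hashtag_list_alt (list : List String) : List (String × Int) :=
  hashtagAltGo list []

-- ===== PRECONDITION & SPEC =====
def Spec_hashtag_list (list : List String) (out : List (String × Int)) : Prop := out = hashtag_list_alt list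
instance (list : List String) (out : List (String × Int)) : Decidable (Spec_hashtag_list list out) := by unfold Spec_hashtag_list; infer_instance

-- ===== CLAIM (what is proved, stated in full; the proofs are below) =====
def Claim_equal_hashtag_list : Prop := ∀ (list : List String), Dom_hashtag_list list → Spec_hashtag_list list (hashtag_list list)

-- ===== LEMMAS AND PROOFS =====

-- A's second loop, with set s and output s.map f already built, yields s updated by l
-- and the corresponding map.
theorem hashtagA_loop (f : String → Int) : ∀ (l : List String) (s : PySem.Set String),
    l.foldl (fun st item =>
        if PySem.Set.contains st.1 item then st
        else (PySem.Set.add st.1 item, st.2 ++ [(item, f item)]))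
      (s, s.map (fun k => (k, f k)))
    = (PySem.Set.update s l, (PySem.Set.update s l).map (fun k => (k, f k))) := by
  intro l
  induction l with
  | nil => intro s; simp [PySem.Set.update]
  | cons x xs ih =>
    intro s
    simp only [List.foldl_cons, PySem.Set.update_cons]
    by_cases hx : x ∈ s
    · rw [if_pos (by simpa [PySem.Set.contains_iff] using hx),
        PySem.Set.add_of_mem hx]
      exact ih s
    · rw [if_neg (by simpa [PySem.Set.contains_iff] using hx)]
      have h2 : s.map (fun k => (k, f k)) ++ [(x, f x)]
          = (PySem.Set.add s x).map (fun k => (k, f k)) := by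
        rw [PySem.Set.add_of_not_mem hx]; simp
      rw [h2]
      exact ih (PySem.Set.add s x)

-- A's first loop is the counter loop: when the key is absent, getD is 0 and 0 + 1 = 1.
theorem freq_step_eq :
    (fun (d : PySem.Dict String Int) item =>
      if d.contains item then d.insert item (d.getD item 0 + 1) else d.insert item 1)
    = (fun (d : PySem.Dict String Int) item => d.insert item (d.getD item 0 + 1)) := by
  funext d item
  cases hc : d.contains item with
  | true => rfl
  | false => simp [PySem.Dict.getD_of_not_contains d 0 hc]

-- A's value in canonical form: first-appearance keys paired with their counts.
theorem hashtagA_canon (list : List String) :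
    hashtag_list list
      = (PySem.Set.ofList list).map (fun k => (k, (list.count k : Int))) := by
  unfold hashtag_list
  rw [freq_step_eq, PySem.Dict.foldl_insert_getD_add_one_eq_counter]
  have h0 : ((PySem.Set.empty : PySem.Set String), ([] : List (String × Int)))
      = (PySem.Set.empty,
        (PySem.Set.empty : PySem.Set String).map
          (fun k => (k, (PySem.Dict.counter list).getD k 0))) := by
    simp [PySem.Set.empty]
  dsimp only
  rw [h0, hashtagA_loop (fun k => (PySem.Dict.counter list).getD k 0) list PySem.Set.empty]
  simp [PySem.Set.update_nil_left, PySem.Dict.getD_counter]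

-- A list's length splits into the count of one value and the length of the rest.
theorem length_count_filter (tl : List String) (head : String) :
    tl.length = tl.count head + (tl.filter (fun y => y != head)).length := by
  induction tl with
  | nil => simp
  | cons a l ih =>
    by_cases h : a = head
    · subst h; simp [List.count_cons_self, ih]; omega
    · simp [h, ih]; omega

-- Set.add past a cons: a stays in front; later adds of a are no-ops.
theorem foldl_add_cons {α : Type} [BEq α] [LawfulBEq α] :
    ∀ (xs : List α) (a : α) (s : List α),
    xs.foldl PySem.Set.add (a :: s)
      = a :: (xs.filter (fun y => y != a)).foldl PySem.Set.add s := by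
  intro xs
  induction xs with
  | nil => intro a s; simp
  | cons y ys ih =>
    intro a s
    by_cases hy : y = a
    · subst hy
      have hadd : PySem.Set.add (y :: s) y = (y :: s) :=
        PySem.Set.add_of_mem (List.mem_cons_self)
      simp only [List.foldl_cons, hadd, ih, List.filter_cons]
      simp
    · have : PySem.Set.add (a :: s) y = a :: PySem.Set.add s y := by
        by_cases hm : y ∈ s
        · rw [PySem.Set.add_of_mem hm, PySem.Set.add_of_mem (List.mem_cons_of_mem _ hm)]
        · rw [PySem.Set.add_of_not_mem hm,
            PySem.Set.add_of_not_mem (by simp [hm, hy])]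
          simp
      simp only [List.foldl_cons, this, ih, List.filter_cons]
      simp [hy]

-- First-appearance dedup of a cons: head, then dedup of the tail with the head removed.
theorem ofList_cons (x : String) (xs : List String) :
    PySem.Set.ofList (x :: xs)
      = x :: PySem.Set.ofList (xs.filter (fun y => y != x)) := by
  show (x :: xs).foldl PySem.Set.add PySem.Set.empty = _
  rw [List.foldl_cons,
    PySem.Set.add_of_not_mem (by simp [PySem.Set.empty])]
  simp only [PySem.Set.empty, List.nil_append]
  exact foldl_add_cons xs x []

-- B's loop in the same canonical form, by strong induction on length of the remaining list.
theorem hashtagB_go_canon : ∀ (n : Nat) (l : List String), l.length ≤ n →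
    ∀ (acc : List (String × Int)),
    hashtagAltGo l acc
      = acc ++ (PySem.Set.ofList l).map (fun k => (k, (l.count k : Int))) := by
  intro n
  induction n with
  | zero =>
    intro l h
    have : l = [] := by cases l <;> simp_all
    subst this; intro acc; simp [hashtagAltGo, PySem.Set.ofList, PySem.Set.empty]
  | succ n ih =>
    intro l h
    match l with
    | [] => intro acc; simp [hashtagAltGo, PySem.Set.ofList, PySem.Set.empty]
    | head :: tl =>
      intro acc
      rw [hashtagAltGo]
      have hrest : (head :: tl).filter (fun item => item != head)
          = tl.filter (fun item => item != head) := by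
        simp
      rw [hrest, ih _ (le_trans (List.length_filter_le _ _) (by simpa using h))]
      rw [ofList_cons, List.append_assoc]
      refine congrArg (acc ++ ·) ?_
      simp only [List.map_cons, List.singleton_append, List.cons.injEq]
      constructor
      · -- head entry: length difference = count
        have hsplit := length_count_filter tl head
        simp only [List.count_cons_self, List.length_cons]
        refine congrArg _ ?_
        omega
      · -- tail: counts agree on elements of the filtered dedup
        apply List.map_congr_left
        intro k hk
        have hk' : k ∈ tl.filter (fun y => y != head) := by
          have := (PySem.Set.mem_ofList _ _).mp hk
          exact this
        have hkne : k ≠ head := by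
          have := List.of_mem_filter hk'
          simpa using this
        have hcf : (tl.filter (fun y => y != head)).count k = tl.count k := by
          rw [List.count_filter (by simp [hkne])]
        rw [hcf, List.count_cons_of_ne (Ne.symm hkne)]

-- ===== VERDICT (by name: the statement is the Claim_ definition above) =====
theorem hashtag_list_spec : Claim_equal_hashtag_list := by
  intro list _
  unfold Spec_hashtag_list
  rw [hashtagA_canon]
  unfold hashtag_list_alt
  rw [hashtagB_go_canon list.length list le_rfl []]
  simp
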